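-- pv_equiv track=rewrite | github.com/Gyanendra-gif/Core-Programs | data_structure/Strings/3_restart.py | function_replace_char
-- ===== SOURCE A (Python) =====
-- def function_replace_char(str):
--     """
--     Description:
--         Function is Used to get a string from a given string where all occurrences of its
--         first char have been changed to '$', except the first char itself.
--     Parameter:
--         Sample String
--     Return:
--         Updated String
--     """
--     my_list = list(str)
--     for i in range(1, len(my_list)):
--         if my_list[i] == my_list[0]:
--             my_list[i] = '$'
--     data = ' '
--     for item in my_list:
--         data = data + item
--     return data
-- ===== SOURCE B (Python) =====
-- def function_replace_char(str):
--     if not str: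
--         return ' '
--     first = str[0]
--     return ' ' + first + str[1:].replace(first, '$')
-- ===== Notes on version B (the rewrite author's own statement) =====
-- stated objective: faster
-- what changed: Replaces A's index loop plus quadratic character-by-character string rebuild with a single str.replace on the tail, appended after the leading space and the untouched first character.
import Mathlib
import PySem

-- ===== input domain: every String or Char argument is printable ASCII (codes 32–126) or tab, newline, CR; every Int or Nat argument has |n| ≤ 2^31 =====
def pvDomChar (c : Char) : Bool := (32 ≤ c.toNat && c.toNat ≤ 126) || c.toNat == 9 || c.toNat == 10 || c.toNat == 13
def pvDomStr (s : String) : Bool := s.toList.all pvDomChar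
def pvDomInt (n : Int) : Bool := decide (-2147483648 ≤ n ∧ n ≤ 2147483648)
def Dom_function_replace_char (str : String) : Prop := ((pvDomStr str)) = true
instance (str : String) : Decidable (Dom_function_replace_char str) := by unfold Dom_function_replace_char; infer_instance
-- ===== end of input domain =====

-- B replaces A's index loop + quadratic char-by-char rebuild with one str.replace on the tail (idiomatic; return value only).

-- ===== PORT A =====
-- the body of A's first 'for i in range(1, len(my_list))' loop
def pvStepA (l : List Char) (i : Int) : List Char :=
  if PySem.List.pyGetD l i ' ' == PySem.List.pyGetD l 0 ' ' then PySem.List.pySetD l i '$' else l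

def function_replace_char (str : String) : String :=
  let myList := str.toList
  let myList := (PySem.List.pyRange 1 (myList.length : Int) 1).foldl pvStepA myList
  -- data = ' '; for item in my_list: data = data + item   (strings as char lists, exact)
  let data := myList.foldl (fun d c => d ++ [c]) [' ']
  String.ofList data

-- ===== PORT B =====
def function_replace_char_alt (str : String) : String :=
  match str.toList with
  | [] => " "                                   -- 'if not str: return ' ''
  | first :: _ =>
      -- ' ' + first + str[1:].replace(first, '$')
      String.ofList (' ' :: first ::
        PySem.Chars.replace (PySem.Chars.slice str.toList (some 1) none) [first] ['$'])

-- ===== PRECONDITION & SPEC =====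
def Spec_function_replace_char (str : String) (out : String) : Prop := out = function_replace_char_alt str
instance (str : String) (out : String) : Decidable (Spec_function_replace_char str out) := by unfold Spec_function_replace_char; infer_instance

-- ===== CLAIM (what is proved, stated in full; the proofs are below) =====
def Claim_equal_function_replace_char : Prop := ∀ (str : String), Dom_function_replace_char str → Spec_function_replace_char str (function_replace_char str)

-- ===== LEMMAS AND PROOFS =====

-- replacement function both programs compute pointwise on the tail
def pvG (f c : Char) : Char := if c = f then '$' else c

theorem pv_foldl_append_singleton (l init : List Char) :
    l.foldl (fun d c => d ++ [c]) init = init ++ l := by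
  induction l generalizing init with
  | nil => simp
  | cons c t ih => simp [List.foldl_cons, ih, List.append_assoc]

theorem pv_set_append_len (pre : List Char) (c v : Char) (t : List Char) :
    (pre ++ c :: t).set pre.length v = pre ++ v :: t := by
  induction pre with
  | nil => simp
  | cons a p ih => simp [ih]

theorem pv_getD_append_len (pre : List Char) (c : Char) (t : List Char) (d : Char) :
    (pre ++ c :: t).getD pre.length d = c := by
  induction pre with
  | nil => simp
  | cons a p ih => simpa using ih

-- invariant of A's first loop: positions 1.. of the tail get mapped by pvG f
theorem pv_loopA (f : Char) (t : List Char) : ∀ (u : List Char),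
    (PySem.List.pyRange (1 + (u.length : Int)) (1 + (u.length : Int) + (t.length : Int)) 1).foldl
      pvStepA (f :: u ++ t) = f :: u ++ t.map (pvG f) := by
  induction t with
  | nil => intro u; simp [PySem.List.pyRange_one_eq_nil]
  | cons c t ih =>
    intro u
    have hlt : 1 + (u.length : Int) < 1 + (u.length : Int) + ((c :: t).length : Int) := by
      simp
    rw [PySem.List.pyRange_one_cons hlt, List.foldl_cons]
    have hcast : 1 + (u.length : Int) = ((u.length + 1 : Nat) : Int) := by push_cast; ring
    have hstep : pvStepA (f :: u ++ c :: t) (1 + (u.length : Int)) = f :: (u ++ [pvG f c]) ++ t := by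
      have h0 : PySem.List.pyGetD (f :: u ++ c :: t) 0 ' ' = f := by
        simpa using PySem.List.pyGetD_natCast (f :: u ++ c :: t) 0 ' '
      have hi : PySem.List.pyGetD (f :: u ++ c :: t) (1 + (u.length : Int)) ' ' = c := by
        rw [hcast, PySem.List.pyGetD_natCast]
        have hg := pv_getD_append_len (f :: u) c t ' '
        simpa using hg
      unfold pvStepA
      rw [h0, hi]
      by_cases hcf : c = f
      · rw [if_pos (by simp [hcf])]
        have hset : PySem.List.pySetD (f :: u ++ c :: t) (1 + (u.length : Int)) '$'
            = f :: u ++ '$' :: t := by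
          rw [hcast, PySem.List.pySetD_natCast]
          have hs := pv_set_append_len (f :: u) c '$' t
          simpa using hs
        rw [hset]
        simp [pvG, hcf]
      · rw [if_neg (by simp [hcf])]
        simp [pvG, hcf]
    rw [hstep]
    have := ih (u ++ [pvG f c])
    have harg : (1 + ((u ++ [pvG f c]).length : Int)) = 1 + (u.length : Int) + 1 := by
      simp; push_cast; ring
    rw [harg] at this
    have hb : 1 + (u.length : Int) + 1 + (t.length : Int)
        = 1 + (u.length : Int) + ((c :: t).length : Int) := by simp; push_cast; ring
    rw [hb] at this
    rw [this]
    simp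

-- single-character replace is a pointwise map
theorem pv_replace_go (a : Char) : ∀ (fuel : Nat) (l acc : List Char), l.length ≤ fuel →
    PySem.Chars.replace.go [a] ['$'] fuel l acc = acc.reverse ++ l.map (pvG a) := by
  intro fuel
  induction fuel with
  | zero =>
    intro l acc h
    have : l = [] := List.eq_nil_of_length_eq_zero (Nat.le_zero.mp h)
    subst this
    simp [PySem.Chars.replace.go]
  | succ n ih =>
    intro l acc h
    cases l with
    | nil => simp [PySem.Chars.replace.go]
    | cons c t =>
      have ht : t.length ≤ n := by simpa using h
      by_cases hca : a = c
      · subst hca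
        simp only [PySem.Chars.replace.go, List.isPrefixOf, beq_self_eq_true,
          List.reverse_singleton, List.singleton_append]
        rw [if_pos (show ((true && true) = true) from rfl)]
        simp only [List.length_cons, List.length_nil, List.drop_succ_cons, List.drop_zero]
        rw [ih t ('$' :: acc) ht]
        simp [pvG]
      · rw [show PySem.Chars.replace.go [a] ['$'] (n+1) (c :: t) acc =
            PySem.Chars.replace.go [a] ['$'] n t (c :: acc) from by
          simp [PySem.Chars.replace.go, List.isPrefixOf, hca]]
        rw [ih t (c :: acc) ht]
        simp [pvG, Ne.symm hca]

theorem pv_replace_single (a : Char) (l : List Char) :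
    PySem.Chars.replace l [a] ['$'] = l.map (pvG a) := by
  unfold PySem.Chars.replace
  simp only [List.isEmpty_cons, if_false, Bool.false_eq_true]
  simpa using pv_replace_go a l.length l [] (le_refl _)

-- ===== VERDICT (by name: the statement is the Claim_ definition above) =====
theorem function_replace_char_spec : Claim_equal_function_replace_char := by
  intro s _
  unfold Spec_function_replace_char function_replace_char function_replace_char_alt
  cases hcs : s.toList with
  | nil => simp [hcs, PySem.List.pyRange_one_eq_nil, pv_foldl_append_singleton]
  | cons f t =>
    simp only [hcs]
    have hloop : (PySem.List.pyRange 1 (1 + (t.length : Int)) 1).foldl pvStepA (f :: t)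
        = f :: t.map (pvG f) := by simpa using pv_loopA f t []
    have hrange : ((f :: t).length : Int) = 1 + (t.length : Int) := by
      simp; push_cast; ring
    rw [hrange, hloop, pv_foldl_append_singleton]
    rw [PySem.Chars.slice_eq_listSlice, PySem.List.slice_from _ (by norm_num)]
    rw [pv_replace_single f (List.drop (1 : Int).toNat (f :: t))]
    simp
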